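-- pv_equiv track=rewrite | github.com/LupoBN/Deep-Learning-ass3 | Utils.py | parse_tag_reading
-- ===== SOURCE A (Python) =====
-- import copy
--
-- def parse_tag_reading(lines, seperator, lower=False):
--     words = list()
--     labels = list()
--     sentence = list()
--     sentence_labels = list()
--     for line in lines:
--         if line != '':
--             words_labels = line.split()
--             if lower:
--                 words_labels[0] = words_labels[0].lower()
--             sentence.append(words_labels[0])
--             if len(words_labels) > 1:
--                 sentence_labels.append(words_labels[1])
--         else:
--             sentence = ["^^^^^"] + sentence + ["$$$$$"]
--             sentence_labels = ["Start-"] + sentence_labels + ["End-"]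
--             words.append(copy.deepcopy(sentence))
--             labels.append(copy.deepcopy(sentence_labels))
--             sentence = list()
--             sentence_labels = list()
--     return words, labels
-- ===== SOURCE B (Python) =====
-- def _token(line, lower):
--     t = line.split()[0]
--     return t.lower() if lower else t
--
--
-- def parse_tag_reading(lines, seperator, lower=False):
--     # First pass: split lines into groups, one group per '' encountered
--     # (any trailing lines after the last '' are discarded).
--     groups = []
--     current = []
--     for line in lines:
--         if line == '':
--             groups.append(current)
--             current = []
--         else:
--             current.append(line)
--     # Second pass: map each group to its word sentence and label sentence.
--     words = [['^^^^^'] + [_token(l, lower) for l in g] + ['$$$$$'] for g in groups]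
--     labels = [['Start-'] + [t for l in g for t in l.split()[1:2]] + ['End-'] for g in groups]
--     return words, labels
-- ===== Notes on version B (the rewrite author's own statement) =====
-- stated objective: alternative
-- what changed: Replaces A's single loop with a running sentence accumulator that is reset at each boundary by a two-phase group-then-map decomposition: first split lines into groups at '' markers (dropping the trailing segment), then build each sentence/label list from its group by comprehensions.
import Mathlib
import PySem

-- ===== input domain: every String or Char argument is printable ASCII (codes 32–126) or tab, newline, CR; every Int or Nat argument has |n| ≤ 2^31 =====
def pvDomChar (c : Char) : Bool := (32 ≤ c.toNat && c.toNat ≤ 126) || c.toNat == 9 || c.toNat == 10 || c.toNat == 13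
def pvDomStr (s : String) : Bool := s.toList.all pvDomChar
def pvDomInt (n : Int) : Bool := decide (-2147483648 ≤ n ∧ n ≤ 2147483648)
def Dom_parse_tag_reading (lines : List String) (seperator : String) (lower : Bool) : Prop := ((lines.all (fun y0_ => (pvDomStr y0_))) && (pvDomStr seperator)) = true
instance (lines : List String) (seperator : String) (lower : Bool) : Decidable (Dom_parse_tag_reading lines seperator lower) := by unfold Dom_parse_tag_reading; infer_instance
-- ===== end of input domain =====

-- B replaces A's running accumulator-and-reset loop with a two-phase group-then-map
-- decomposition (alternative decomposition, same O(n) cost).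

-- ===== PORT A =====
-- state: ((words, labels), (sentence, sentence_labels))
def pvStepA (lower : Bool)
    (st : (List (List String) × List (List String)) × (List String × List String))
    (line : String) :
    (List (List String) × List (List String)) × (List String × List String) :=
  if line ≠ "" then
    match PySem.Str.split₀ line with
    | [] => st   -- Python raises IndexError (words_labels[0]) here; excluded by Pre_
    | w0 :: rest =>
      let w0 := if lower then PySem.Str.lower w0 else w0
      let sl := match rest with            -- if len(words_labels) > 1: append words_labels[1]
        | [] => st.2.2
        | w1 :: _ => st.2.2 ++ [w1]
      (st.1, (st.2.1 ++ [w0], sl))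
  else
    ((st.1.1 ++ [["^^^^^"] ++ st.2.1 ++ ["$$$$$"]],
      st.1.2 ++ [["Start-"] ++ st.2.2 ++ ["End-"]]),
     ([], []))

def parse_tag_reading (lines : List String) (seperator : String) (lower : Bool) :
    List (List String) × List (List String) :=
  (lines.foldl (pvStepA lower) (([], []), ([], []))).1

-- ===== PORT B =====
-- _token(line, lower); the [] case is Python's IndexError, excluded by Pre_
def pvToken (lower : Bool) (line : String) : String :=
  match PySem.Str.split₀ line with
  | [] => ""
  | t :: _ => if lower then PySem.Str.lower t else t

def parse_tag_reading_alt (lines : List String) (seperator : String) (lower : Bool) :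
    List (List String) × List (List String) :=
  -- first pass: split into groups at '' (trailing segment discarded)
  let p := lines.foldl
    (fun (st : List (List String) × List String) line =>
      if line = "" then (st.1 ++ [st.2], []) else (st.1, st.2 ++ [line]))
    ([], [])
  let groups := p.1
  -- second pass: map each group to its sentence / label list
  (groups.map (fun g => ["^^^^^"] ++ g.map (pvToken lower) ++ ["$$$$$"]),
   groups.map (fun g =>
     ["Start-"] ++ g.flatMap (fun l => PySem.List.slice (PySem.Str.split₀ l) (some 1) (some 2)) ++ ["End-"]))

-- ===== PRECONDITION & SPEC =====
-- Pre_ excludes inputs containing a non-empty whitespace-only line: there line.split()[0]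
-- raises IndexError in A (and in B whenever the line lies inside a group).
def Pre_parse_tag_reading (lines : List String) (seperator : String) (lower : Bool) : Prop :=
  ∀ l ∈ lines, l = "" ∨ PySem.Str.split₀ l ≠ []
instance (lines : List String) (seperator : String) (lower : Bool) : Decidable (Pre_parse_tag_reading lines seperator lower) := by unfold Pre_parse_tag_reading; infer_instance

def pvWitness_parse_tag_reading : List String × String × Bool := (["a B", "", "c", ""], " ", true)

def Spec_parse_tag_reading (lines : List String) (seperator : String) (lower : Bool) (out : List (List String) × List (List String)) : Prop := out = parse_tag_reading_alt lines seperator lower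
instance (lines : List String) (seperator : String) (lower : Bool) (out : List (List String) × List (List String)) : Decidable (Spec_parse_tag_reading lines seperator lower out) := by unfold Spec_parse_tag_reading; infer_instance

-- ===== CLAIM (what is proved, stated in full; the proofs are below) =====
def Claim_equal_parse_tag_reading : Prop := ∀ (lines : List String) (seperator : String) (lower : Bool), Dom_parse_tag_reading lines seperator lower → Pre_parse_tag_reading lines seperator lower → Spec_parse_tag_reading lines seperator lower (parse_tag_reading lines seperator lower)

-- ===== LEMMAS AND PROOFS =====

-- abbreviations for B's per-group maps
def pvW (lower : Bool) (g : List String) : List String :=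
  ["^^^^^"] ++ g.map (pvToken lower) ++ ["$$$$$"]
def pvTag (l : String) : List String := ((PySem.Str.split₀ l).drop 1).take 1
def pvL (g : List String) : List String := ["Start-"] ++ g.flatMap pvTag ++ ["End-"]

lemma pv_slice12 (xs : List String) :
    PySem.List.slice xs (some 1) (some 2) = (xs.drop 1).take 1 := by
  have h := PySem.List.slice_natCast (xs := xs) (a := 1) (b := 2)
  simpa using h

def pvStepB (st : List (List String) × List String) (line : String) :
    List (List String) × List String :=
  if line = "" then (st.1 ++ [st.2], []) else (st.1, st.2 ++ [line])

-- main invariant: A's fold over any suffix of good lines, started from the state that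
-- corresponds to B's grouping state (gs, cur), equals the image of B's fold state.
lemma pv_loop_eq (lower : Bool) :
    ∀ (lines : List String), (∀ l ∈ lines, l = "" ∨ PySem.Str.split₀ l ≠ []) →
    ∀ (gs : List (List String)) (cur : List String),
    lines.foldl (pvStepA lower)
      ((gs.map (pvW lower), gs.map pvL), (cur.map (pvToken lower), cur.flatMap pvTag))
    = (((lines.foldl pvStepB (gs, cur)).1.map (pvW lower),
        (lines.foldl pvStepB (gs, cur)).1.map pvL),
       ((lines.foldl pvStepB (gs, cur)).2.map (pvToken lower),
        (lines.foldl pvStepB (gs, cur)).2.flatMap pvTag)) := by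
  intro lines
  induction lines with
  | nil => intro _ gs cur; simp
  | cons line rest ih =>
    intro hg gs cur
    have hline := hg line (List.mem_cons_self ..)
    have hrest : ∀ l ∈ rest, l = "" ∨ PySem.Str.split₀ l ≠ [] := fun l hl => hg l (List.mem_cons_of_mem _ hl)
    by_cases he : line = ""
    · subst he
      have hA : pvStepA lower ((gs.map (pvW lower), gs.map pvL),
            (cur.map (pvToken lower), cur.flatMap pvTag)) ""
          = (((gs ++ [cur]).map (pvW lower), (gs ++ [cur]).map pvL), ([], [])) := by
        simp [pvStepA, pvW, pvL]
      have hB : pvStepB (gs, cur) "" = (gs ++ [cur], []) := by simp [pvStepB]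
      have := ih hrest (gs ++ [cur]) []
      simpa [List.foldl_cons, hA, hB] using this
    · rcases hline with h | hsp
      · exact absurd h he
      · obtain ⟨w0, rest0, hsplit⟩ : ∃ w0 rest0, PySem.Str.split₀ line = w0 :: rest0 := by
          cases h : PySem.Str.split₀ line with
          | nil => exact absurd h hsp
          | cons a b => exact ⟨a, b, rfl⟩
        have htok : pvToken lower line = if lower then PySem.Str.lower w0 else w0 := by
          simp [pvToken, hsplit]
        have htag : pvTag line = rest0.take 1 := by simp [pvTag, hsplit]
        have hA : pvStepA lower ((gs.map (pvW lower), gs.map pvL),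
              (cur.map (pvToken lower), cur.flatMap pvTag)) line
            = ((gs.map (pvW lower), gs.map pvL),
               ((cur ++ [line]).map (pvToken lower), (cur ++ [line]).flatMap pvTag)) := by
          simp only [pvStepA, if_pos he, hsplit]
          cases rest0 with
          | nil => simp [htok, htag]
          | cons w1 tl => simp [htok, htag]
        have hB : pvStepB (gs, cur) line = (gs, cur ++ [line]) := by
          simp [pvStepB, he]
        have := ih hrest gs (cur ++ [line])
        simpa [List.foldl_cons, hA, hB] using this

-- ===== VERDICT (by name: the statement is the Claim_ definition above) =====
theorem parse_tag_reading_spec : Claim_equal_parse_tag_reading := by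
  intro lines seperator lower _ hpre
  unfold Spec_parse_tag_reading parse_tag_reading parse_tag_reading_alt
  have h := pv_loop_eq lower lines hpre [] []
  simp only [List.map_nil, List.flatMap_nil] at h

  rw [h]
  refine Prod.ext ?_ ?_
  · exact List.map_congr_left fun g _ => by simp [pvW]
  · have ht : pvTag = fun l => ((PySem.Str.split₀ l).tail).take 1 :=
      funext fun l => by simp [pvTag, List.drop_one]
    exact List.map_congr_left fun g _ => by simp [pvL, pv_slice12, ht, List.drop_one]
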